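-- pv_equiv track=rewrite | github.com/ariel-bentu/mikdash-font | scripts/assemble_from_font.py | _contour_to_segments
-- ===== SOURCE A (Python) =====
-- def _contour_to_segments(contour):
--     segments = []
--     current_segment = []
--     for i, (x, y, on_curve) in enumerate(contour):
--         if i == 0:
--             segments.append([(x, y)])
--             continue
--         if on_curve:
--             current_segment.append((x, y))
--             segments.append(current_segment)
--             current_segment = []
--         else:
--             current_segment.append((x, y))
--     return segments
-- ===== SOURCE B (Python) =====
-- def _contour_to_segments(contour):
--     if not contour:
--         return []
--     segments = [[(contour[0][0], contour[0][1])]]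
--     rest = contour[1:]
--     while rest:
--         k = next((j for j, p in enumerate(rest) if p[2]), None)
--         if k is None:
--             break
--         segments.append([(x, y) for (x, y, _) in rest[:k + 1]])
--         rest = rest[k + 1:]
--     return segments
-- ===== Notes on version B (the rewrite author's own statement) =====
-- stated objective: alternative
-- what changed: Instead of A's single pass with a mutable current-segment accumulator and per-index flag checks, B seeds the first point as its own segment and repeatedly finds the next on-curve point and slices the whole segment out in one step, naturally dropping trailing off-curve points.
import Mathlib
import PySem

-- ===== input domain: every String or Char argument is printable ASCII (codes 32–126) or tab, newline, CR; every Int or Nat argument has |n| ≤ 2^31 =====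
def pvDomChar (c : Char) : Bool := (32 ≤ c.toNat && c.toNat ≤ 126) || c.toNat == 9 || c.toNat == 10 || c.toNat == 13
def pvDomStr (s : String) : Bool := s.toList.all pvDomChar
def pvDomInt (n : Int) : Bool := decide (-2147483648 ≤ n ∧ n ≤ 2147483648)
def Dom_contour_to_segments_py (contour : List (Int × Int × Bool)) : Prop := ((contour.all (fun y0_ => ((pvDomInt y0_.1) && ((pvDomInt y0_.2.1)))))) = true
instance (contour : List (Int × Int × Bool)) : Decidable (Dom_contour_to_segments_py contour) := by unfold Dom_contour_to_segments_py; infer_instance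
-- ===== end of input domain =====

-- B replaces A's single pass with a mutable current-segment accumulator by seeding the first
-- point and repeatedly slicing out the run up to the next on-curve point (objective: alternative).

-- ===== PORT A =====
-- loop body of `for i, (x, y, on_curve) in enumerate(contour)`, state (segments, current_segment)
def aStep (st : List (List (Int × Int)) × List (Int × Int)) (p : Int × (Int × Int × Bool)) :
    List (List (Int × Int)) × List (Int × Int) :=
  let i := p.1
  let x := p.2.1
  let y := p.2.2.1
  let on_curve := p.2.2.2
  if i = 0 then (st.1 ++ [[(x, y)]], st.2)
  else if on_curve then (st.1 ++ [st.2 ++ [(x, y)]], [])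
  else (st.1, st.2 ++ [(x, y)])

def contour_to_segments_py (contour : List (Int × Int × Bool)) : List (List (Int × Int)) :=
  (((PySem.List.enumerate contour 0).foldl aStep ([], []))).1

-- ===== PORT B =====
-- while rest: find index k of first on-curve point (takeWhile/dropWhile = scan for k),
-- slice rest[:k+1] as a segment, continue on rest[k+1:]; stop when no on-curve point remains
def bsplit (rest : List (Int × Int × Bool)) : List (List (Int × Int)) :=
  match h : rest.dropWhile (fun p => !p.2.2) with
  | [] => []
  | q :: r =>
    ((rest.takeWhile (fun p => !p.2.2)) ++ [q]).map (fun p => (p.1, p.2.1)) :: bsplit r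
termination_by rest.length
decreasing_by
  have hs := (List.dropWhile_sublist (l := rest) (p := fun p => !p.2.2)).length_le
  rw [h] at hs
  simp at hs
  omega

def contour_to_segments_py_alt (contour : List (Int × Int × Bool)) : List (List (Int × Int)) :=
  match contour with
  | [] => []
  | (x, y, _) :: rest => [(x, y)] :: bsplit rest

-- ===== PRECONDITION & SPEC =====
def Spec_contour_to_segments_py (contour : List (Int × Int × Bool)) (out : List (List (Int × Int))) : Prop := out = contour_to_segments_py_alt contour
instance (contour : List (Int × Int × Bool)) (out : List (List (Int × Int))) : Decidable (Spec_contour_to_segments_py contour out) := by unfold Spec_contour_to_segments_py; infer_instance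

-- ===== CLAIM (what is proved, stated in full; the proofs are below) =====
def Claim_equal_contour_to_segments_py : Prop := ∀ (contour : List (Int × Int × Bool)), Dom_contour_to_segments_py contour → Spec_contour_to_segments_py contour (contour_to_segments_py contour)

-- ===== LEMMAS AND PROOFS =====

-- reference splitter: A's accumulator loop without the index
def splitC (cur : List (Int × Int)) : List (Int × Int × Bool) → List (List (Int × Int))
  | [] => []
  | (x, y, oc) :: t =>
    if oc then (cur ++ [(x, y)]) :: splitC [] t else splitC (cur ++ [(x, y)]) t

-- one unfolding of B's splitter, with an extra already-collected prefix
def bstep (cur : List (Int × Int)) (t : List (Int × Int × Bool)) : List (List (Int × Int)) :=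
  match t.dropWhile (fun p => !p.2.2) with
  | [] => []
  | q :: r =>
    (cur ++ ((t.takeWhile (fun p => !p.2.2)) ++ [q]).map (fun p => (p.1, p.2.1))) :: bsplit r

lemma bsplit_eq_bstep (t : List (Int × Int × Bool)) : bsplit t = bstep [] t := by
  rw [bsplit, bstep]
  simp only [List.nil_append]
  split <;> rename_i h2 <;> rw [h2]

lemma splitC_eq_bstep : ∀ (t : List (Int × Int × Bool)) (cur : List (Int × Int)),
    splitC cur t = bstep cur t := by
  intro t
  induction t with
  | nil => intro cur; simp [splitC, bstep]
  | cons p t ih =>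
    intro cur
    obtain ⟨x, y, oc⟩ := p
    cases oc with
    | true =>
      simp [splitC, bstep, List.dropWhile, List.takeWhile, ih [],
        bsplit_eq_bstep t]
    | false =>
      rw [splitC, if_neg (by simp), ih (cur ++ [(x, y)])]
      unfold bstep
      simp [List.dropWhile, List.takeWhile]

lemma foldA : ∀ (t : List (Int × Int × Bool)) (s : Int)
    (segs : List (List (Int × Int))) (cur : List (Int × Int)), 1 ≤ s →
    ((PySem.List.enumerate t s).foldl aStep (segs, cur)).1
    = segs ++ splitC cur t := by
  intro t
  induction t with
  | nil => intro s segs cur hs; simp [PySem.List.enumerate_nil, splitC]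
  | cons p t ih =>
    intro s segs cur hs
    obtain ⟨x, y, oc⟩ := p
    rw [PySem.List.enumerate_cons]
    have hs0 : ¬ (s = 0) := by omega
    have hstep : ∀ st : List (List (Int × Int)) × List (Int × Int),
        aStep st (s, (x, y, oc)) =
          if oc then (st.1 ++ [st.2 ++ [(x, y)]], []) else (st.1, st.2 ++ [(x, y)]) := by
      intro st; simp [aStep, hs0]
    cases oc with
    | true =>
      rw [List.foldl_cons, hstep, if_pos rfl, ih (s + 1) _ _ (by omega)]
      simp [splitC]
    | false =>
      rw [List.foldl_cons, hstep, if_neg (by simp), ih (s + 1) _ _ (by omega)]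
      simp [splitC]

-- ===== VERDICT (by name: the statement is the Claim_ definition above) =====
theorem contour_to_segments_py_spec : Claim_equal_contour_to_segments_py := by
  intro contour _
  unfold Spec_contour_to_segments_py contour_to_segments_py contour_to_segments_py_alt
  cases contour with
  | nil => simp [PySem.List.enumerate_nil]
  | cons p t =>
    obtain ⟨x, y, oc⟩ := p
    rw [PySem.List.enumerate_cons, List.foldl_cons]
    have h0 : aStep ([], []) ((0 : Int), (x, y, oc)) = ([[(x, y)]], []) := by
      simp [aStep]
    rw [h0, foldA t (0 + 1) [[(x, y)]] [] (by omega)]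
    rw [splitC_eq_bstep, ← bsplit_eq_bstep]
    simp
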